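-- pv_equiv track=rewrite | github.com/richardOlson/nfl_plays_predictions | pages/predictions.py | getCompletedList
-- ===== SOURCE A (Python) =====
-- def getCompletedList(catListPass, catListRun, catNamesRun, catNamesPass):
--     # the list to return
--     finalList = []
--     # this is a list that is a
--     # combo of the catListRun and the catListPass
--     cmp = catListRun + catListPass
--     # complete list of the names
--     nameComp = catNamesRun + catNamesPass
--
--     theList = [
--
--         'prev_offense_play_No Previous',
--              'prev_ply_bad_run',
--              'prev_ply_bad_pass',
--              'prev_ply_no_succ_run',
--              'prev_ply_no_succ_pass',
--              'prev_ply_little_succ_pass',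
--              'prev_ply_mild_succ_run',
--              'prev_ply_mild_succ_pass',
--              'prev_ply_succ_run',
--              'prev_ply_succ_pass',
--              'prev_ply_high_succ_run',
--              'prev_ply_high_succ_pass',
--
--     ]
--     finalList.append(('prev_offense_play_No Previous', 0))
--     for i in range(1, len(theList)):
--         for j in range(len(nameComp)):
--             if nameComp[j] == theList[i]:
--                 finalList.append((nameComp[j], cmp[j]))
--
--     return finalList
-- ===== SOURCE B (Python) =====
-- def getCompletedList(catListPass, catListRun, catNamesRun, catNamesPass):
--     cats = [
--         'prev_ply_bad_run',
--         'prev_ply_bad_pass',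
--         'prev_ply_no_succ_run',
--         'prev_ply_no_succ_pass',
--         'prev_ply_little_succ_pass',
--         'prev_ply_mild_succ_run',
--         'prev_ply_mild_succ_pass',
--         'prev_ply_succ_run',
--         'prev_ply_succ_pass',
--         'prev_ply_high_succ_run',
--         'prev_ply_high_succ_pass',
--     ]
--     # one pass: group the values by name
--     buckets = {}
--     for name, val in zip(catNamesRun + catNamesPass, catListRun + catListPass):
--         buckets.setdefault(name, []).append(val)
--     finalList = [('prev_offense_play_No Previous', 0)]
--     for c in cats:
--         finalList += [(c, v) for v in buckets.get(c, [])]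
--     return finalList
-- ===== Notes on version B (the rewrite author's own statement) =====
-- stated objective: simpler
-- what changed: A rescans the whole name list once per each of the 11 category names (nested loops); B makes one pass over the zipped name/value pairs grouping values into a dict by name, then emits each category's bucket in the fixed order.
import Mathlib
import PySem

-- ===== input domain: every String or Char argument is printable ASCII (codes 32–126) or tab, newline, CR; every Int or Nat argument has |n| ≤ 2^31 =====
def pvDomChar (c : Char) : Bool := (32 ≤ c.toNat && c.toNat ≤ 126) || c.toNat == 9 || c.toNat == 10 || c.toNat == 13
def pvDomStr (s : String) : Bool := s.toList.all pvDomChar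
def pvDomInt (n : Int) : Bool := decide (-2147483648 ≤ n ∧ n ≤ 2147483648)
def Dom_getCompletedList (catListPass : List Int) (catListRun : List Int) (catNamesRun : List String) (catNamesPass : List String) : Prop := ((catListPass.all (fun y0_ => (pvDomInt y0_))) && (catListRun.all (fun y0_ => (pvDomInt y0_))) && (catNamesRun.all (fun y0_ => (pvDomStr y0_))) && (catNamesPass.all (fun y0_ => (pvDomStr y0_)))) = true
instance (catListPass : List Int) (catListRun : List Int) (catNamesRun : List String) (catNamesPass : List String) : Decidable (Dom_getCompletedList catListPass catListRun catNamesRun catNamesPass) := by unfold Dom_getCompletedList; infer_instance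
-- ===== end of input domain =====

-- B replaces A's 11 rescans of the name list by one grouping pass into a dict plus per-category lookups (objective: simpler).


-- ===== PORT A =====
-- A's literal in-function list `theList` (12 entries, index 0 is the fixed header name)
def pvTheList : List String :=
  [ "prev_offense_play_No Previous",
    "prev_ply_bad_run",
    "prev_ply_bad_pass",
    "prev_ply_no_succ_run",
    "prev_ply_no_succ_pass",
    "prev_ply_little_succ_pass",
    "prev_ply_mild_succ_run",
    "prev_ply_mild_succ_pass",
    "prev_ply_succ_run",
    "prev_ply_succ_pass",
    "prev_ply_high_succ_run",
    "prev_ply_high_succ_pass" ]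

-- nested index loops, step for step; cmp[j] is read only under the match (Pre_ keeps it in range)
def getCompletedList (catListPass : List Int) (catListRun : List Int) (catNamesRun : List String) (catNamesPass : List String) : List (String × Int) :=
  let cmp : List Int := catListRun ++ catListPass
  let nameComp : List String := catNamesRun ++ catNamesPass
  (PySem.List.pyRange 1 (pvTheList.length : Int) 1).foldl
    (fun acc i =>
      (PySem.List.pyRange 0 (nameComp.length : Int) 1).foldl
        (fun acc2 j =>
          if PySem.List.pyGetD nameComp j "" = PySem.List.pyGetD pvTheList i "" then
            acc2 ++ [(PySem.List.pyGetD nameComp j "", PySem.List.pyGetD cmp j 0)]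
          else acc2)
        acc)
    [("prev_offense_play_No Previous", 0)]

-- ===== PORT B =====
-- B's literal category list (A's theList without the header entry)
def pvCats : List String :=
  [ "prev_ply_bad_run",
    "prev_ply_bad_pass",
    "prev_ply_no_succ_run",
    "prev_ply_no_succ_pass",
    "prev_ply_little_succ_pass",
    "prev_ply_mild_succ_run",
    "prev_ply_mild_succ_pass",
    "prev_ply_succ_run",
    "prev_ply_succ_pass",
    "prev_ply_high_succ_run",
    "prev_ply_high_succ_pass" ]

def getCompletedList_alt (catListPass : List Int) (catListRun : List Int) (catNamesRun : List String) (catNamesPass : List String) : List (String × Int) :=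
  let pairs : List (String × Int) := (catNamesRun ++ catNamesPass).zip (catListRun ++ catListPass)
  -- buckets.setdefault(name, []).append(val)  (= modify name [] (· ++ [val]))
  let buckets : PySem.Dict String (List Int) :=
    pairs.foldl (fun d p => d.modify p.1 [] (fun l => l ++ [p.2])) PySem.Dict.empty
  pvCats.foldl
    (fun finalList c => finalList ++ (buckets.getD c []).map (fun v => (c, v)))
    [("prev_offense_play_No Previous", 0)]

-- ===== PRECONDITION & SPEC =====
-- Pre_ excludes exactly the inputs where A raises IndexError: a name equal to one of the 11
-- category names sitting at an index ≥ len(catListRun) + len(catListPass) in the combined name list.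
def Pre_getCompletedList (catListPass : List Int) (catListRun : List Int) (catNamesRun : List String) (catNamesPass : List String) : Prop :=
  ∀ s ∈ (catNamesRun ++ catNamesPass).drop (catListRun ++ catListPass).length, s ∉ pvCats
instance (catListPass : List Int) (catListRun : List Int) (catNamesRun : List String) (catNamesPass : List String) : Decidable (Pre_getCompletedList catListPass catListRun catNamesRun catNamesPass) := by unfold Pre_getCompletedList; infer_instance
def pvWitness_getCompletedList : List Int × List Int × List String × List String :=
  ([2], [1], ["prev_ply_bad_run"], ["prev_ply_succ_pass"])

def Spec_getCompletedList (catListPass : List Int) (catListRun : List Int) (catNamesRun : List String) (catNamesPass : List String) (out : List (String × Int)) : Prop := out = getCompletedList_alt catListPass catListRun catNamesRun catNamesPass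
instance (catListPass : List Int) (catListRun : List Int) (catNamesRun : List String) (catNamesPass : List String) (out : List (String × Int)) : Decidable (Spec_getCompletedList catListPass catListRun catNamesRun catNamesPass out) := by unfold Spec_getCompletedList; infer_instance

-- ===== CLAIM (what is proved, stated in full; the proofs are below) =====
def Claim_equal_getCompletedList : Prop := ∀ (catListPass : List Int) (catListRun : List Int) (catNamesRun : List String) (catNamesPass : List String), Dom_getCompletedList catListPass catListRun catNamesRun catNamesPass → Pre_getCompletedList catListPass catListRun catNamesRun catNamesPass → Spec_getCompletedList catListPass catListRun catNamesRun catNamesPass (getCompletedList catListPass catListRun catNamesRun catNamesPass)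
-- ===== LEMMAS AND PROOFS =====

-- A's inner loop over j, for a fixed category name c, appends exactly the values paired (by
-- position) with an occurrence of c — provided no occurrence of c lies beyond the value list.
lemma innerA_eq (names : List String) (vals : List Int) (c : String)
    (h : ∀ s ∈ names.drop vals.length, s ≠ c) (acc : List (String × Int)) :
    (PySem.List.pyRange 0 (names.length : Int) 1).foldl
      (fun acc2 j =>
        if PySem.List.pyGetD names j "" = c then
          acc2 ++ [(PySem.List.pyGetD names j "", PySem.List.pyGetD vals j 0)]
        else acc2) acc
    = acc ++ ((names.zip vals).filter (fun p => p.1 == c)).map (fun p => (c, p.2)) := by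
  induction names generalizing vals acc with
  | nil => simp
  | cons x names ih =>
    rw [PySem.List.pyRange_zero_nat, List.foldl_map]
    simp only [List.length_cons, List.range_succ_eq_map, List.foldl_cons, List.foldl_map,
      PySem.List.pyGetD_natCast]
    cases vals with
    | nil =>
      have hx : x ≠ c := h x (by simp)
      have hall : ∀ s ∈ names.drop ([] : List Int).length, s ≠ c := by
        intro s hs
        exact h s (List.mem_cons_of_mem x (by simpa using hs))
      simp only [List.getD_cons_zero, if_neg hx]
      have := ih [] hall acc
      rw [PySem.List.pyRange_zero_nat, List.foldl_map] at this
      simp only [PySem.List.pyGetD_natCast, List.getD_eq_getElem?_getD] at this ⊢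
      simpa using this
    | cons v vs =>
      have hall : ∀ s ∈ names.drop vs.length, s ≠ c := by
        intro s hs; exact h s (by simpa using hs)
      by_cases hx : x = c
      · subst hx
        simp only [List.getD_cons_zero]
        have := ih vs hall (acc ++ [(x, v)])
        rw [PySem.List.pyRange_zero_nat, List.foldl_map] at this
        simp only [PySem.List.pyGetD_natCast, List.getD_eq_getElem?_getD] at this ⊢
        simp [this, List.zip_cons_cons]
      · simp only [List.getD_cons_zero, if_neg hx]
        have := ih vs hall acc
        rw [PySem.List.pyRange_zero_nat, List.foldl_map] at this
        simp only [PySem.List.pyGetD_natCast, List.getD_eq_getElem?_getD] at this ⊢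
        simp [this, List.zip_cons_cons, hx]

-- A's outer loop runs over theList[1:], i.e. over pvCats
lemma cats_eq_map :
    pvCats = (PySem.List.pyRange 1 (pvTheList.length : Int) 1).map
      (fun i => PySem.List.pyGetD pvTheList i "") := by decide

-- ===== VERDICT (by name: the statement is the Claim_ definition above) =====
theorem getCompletedList_spec : Claim_equal_getCompletedList := by
  intro catListPass catListRun catNamesRun catNamesPass _ hPre
  unfold Spec_getCompletedList getCompletedList getCompletedList_alt
  simp only []
  set cmp : List Int := catListRun ++ catListPass with hcmp
  set nameComp : List String := catNamesRun ++ catNamesPass with hnc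
  rw [cats_eq_map, List.foldl_map]
  apply PySem.List.foldl_congr_mem
  intro acc i hi
  have hc : PySem.List.pyGetD pvTheList i "" ∈ pvCats := by
    rw [cats_eq_map]; exact List.mem_map_of_mem hi
  have hnotc : ∀ s ∈ nameComp.drop cmp.length, s ≠ PySem.List.pyGetD pvTheList i "" := by
    intro s hs heq; exact hPre s hs (heq ▸ hc)
  rw [innerA_eq nameComp cmp _ hnotc acc,
    PySem.Dict.getD_foldl_modify_append (nameComp.zip cmp) PySem.Dict.empty]
  simp [List.map_map, Function.comp, PySem.Dict.getD_empty]
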